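-- pv_equiv track=rewrite | github.com/avisajn/bacas | flashgo_web/common/utils.py | divide_deal_ids_by_suffix
-- ===== SOURCE A (Python) =====
-- def divide_deal_ids_by_suffix(deal_ids):
--     deal_ids_map = {}
--     for deal_id in deal_ids:
--         suffix = str(deal_id)[-2:]
--         deal_ids = deal_ids_map.get(suffix, set())
--         deal_ids.add(deal_id)
--         deal_ids_map[suffix] = deal_ids
--     return deal_ids_map
-- ===== SOURCE B (Python) =====
-- def divide_deal_ids_by_suffix(deal_ids):
--     keyed = [(str(d)[-2:], d) for d in deal_ids]
--     result = {}
--     for suffix in dict.fromkeys(k for k, _ in keyed):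
--         group = set()
--         for k, d in keyed:
--             if k == suffix:
--                 group.add(d)
--         result[suffix] = group
--     return result
-- ===== Notes on version B (the rewrite author's own statement) =====
-- stated objective: alternative
-- what changed: Replaces the online dict-of-sets bucketing single pass with a two-phase plan: materialize (suffix, id) pairs once, dedup the suffixes in first-occurrence order, then build each bucket by one scan per distinct suffix.
import Mathlib
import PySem

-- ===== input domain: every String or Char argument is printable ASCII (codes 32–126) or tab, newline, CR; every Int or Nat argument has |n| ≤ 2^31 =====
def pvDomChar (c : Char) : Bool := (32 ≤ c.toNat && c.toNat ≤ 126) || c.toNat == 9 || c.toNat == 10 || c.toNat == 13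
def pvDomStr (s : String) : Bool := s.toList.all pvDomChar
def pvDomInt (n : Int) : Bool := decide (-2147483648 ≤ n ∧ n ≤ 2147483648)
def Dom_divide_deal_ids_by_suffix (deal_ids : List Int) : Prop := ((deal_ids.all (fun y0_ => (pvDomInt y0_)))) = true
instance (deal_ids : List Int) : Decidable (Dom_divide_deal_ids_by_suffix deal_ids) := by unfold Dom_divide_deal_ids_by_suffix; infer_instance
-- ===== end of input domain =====

-- B builds the dict in two phases (dedup the suffix keys, then one scan per distinct suffix)
-- instead of A's online dict-of-sets bucketing; same return value, no speed claim.

-- ===== PORT A =====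
-- suffix = str(deal_id)[-2:]
def pvSuffix (d : Int) : String :=
  PySem.Str.slice (PySem.Int.toStr d) (some (-2)) none

def divide_deal_ids_by_suffix (deal_ids : List Int) : List (String × List Int) :=
  (deal_ids.foldl
    (fun m d =>
      let suffix := pvSuffix d
      let s := m.getD suffix PySem.Set.empty
      m.insert suffix (PySem.Set.add s d))
    PySem.Dict.empty).items

-- ===== PORT B =====
def divide_deal_ids_by_suffix_alt (deal_ids : List Int) : List (String × List Int) :=
  let keyed := deal_ids.map (fun d => (pvSuffix d, d))
  let suffixes := PySem.List.dedup (keyed.map (·.1))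
  (suffixes.foldl
    (fun r suffix =>
      r.insert suffix
        (keyed.foldl (fun g p => if p.1 = suffix then PySem.Set.add g p.2 else g)
          PySem.Set.empty))
    PySem.Dict.empty).items

-- ===== PRECONDITION & SPEC =====
def Spec_divide_deal_ids_by_suffix (deal_ids : List Int) (out : List (String × List Int)) : Prop := out = divide_deal_ids_by_suffix_alt deal_ids
instance (deal_ids : List Int) (out : List (String × List Int)) : Decidable (Spec_divide_deal_ids_by_suffix deal_ids out) := by unfold Spec_divide_deal_ids_by_suffix; infer_instance

-- ===== CLAIM (what is proved, stated in full; the proofs are below) =====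
def Claim_equal_divide_deal_ids_by_suffix : Prop := ∀ (deal_ids : List Int), Dom_divide_deal_ids_by_suffix deal_ids → Spec_divide_deal_ids_by_suffix deal_ids (divide_deal_ids_by_suffix deal_ids)

-- ===== LEMMAS AND PROOFS =====

-- the bucket B computes for key k, expressed as a fold over the raw list
def pvGrp (k : String) (xs : List Int) : PySem.Set Int :=
  xs.foldl (fun g d => if pvSuffix d = k then PySem.Set.add g d else g) PySem.Set.empty

theorem pvGrp_append_singleton (k : String) (xs : List Int) (d : Int) :
    pvGrp k (xs ++ [d]) =
      if pvSuffix d = k then PySem.Set.add (pvGrp k xs) d else pvGrp k xs := by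
  simp [pvGrp, List.foldl_append]

theorem pvGrp_empty_of_not_mem (k : String) (xs : List Int)
    (h : k ∉ xs.map pvSuffix) : pvGrp k xs = PySem.Set.empty := by
  unfold pvGrp
  rw [PySem.List.foldl_ite_eq_foldl_filter]
  have hnil : xs.filter (fun d => decide (pvSuffix d = k)) = [] :=
    List.filter_eq_nil_iff.mpr
      (fun d hd => by
        simp only [decide_eq_true_eq]
        intro he; exact h (he ▸ List.mem_map_of_mem hd))
  rw [hnil]
  rfl

-- A's loop, characterised: its dict's items are the distinct suffixes in
-- first-occurrence order, each paired with its bucket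
theorem A_items_eq (xs : List Int) :
    (xs.foldl
      (fun m d =>
        let suffix := pvSuffix d
        let s := m.getD suffix PySem.Set.empty
        m.insert suffix (PySem.Set.add s d))
      PySem.Dict.empty).items
    = (PySem.List.dedup (xs.map pvSuffix)).map (fun k => (k, pvGrp k xs)) := by
  induction xs using List.reverseRecOn with
  | nil => rfl
  | append_singleton xs d ih =>
    rw [List.foldl_append]
    have hkeys : (xs.foldl
        (fun m d =>
          let suffix := pvSuffix d
          let s := m.getD suffix PySem.Set.empty
          m.insert suffix (PySem.Set.add s d))
        PySem.Dict.empty).keys = PySem.List.dedup (xs.map pvSuffix) := by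
      show (_ : PySem.Dict String (PySem.Set Int)).items.map (·.1) = _
      rw [ih, List.map_map]
      rw [show ((fun x : String × PySem.Set Int => x.1) ∘ fun k => (k, pvGrp k xs)) = id from rfl,
        List.map_id]
    have hnodup : (xs.foldl
        (fun m d =>
          let suffix := pvSuffix d
          let s := m.getD suffix PySem.Set.empty
          m.insert suffix (PySem.Set.add s d))
        PySem.Dict.empty).keys.Nodup := by
      rw [hkeys, PySem.List.dedup_eq_ofList]; exact PySem.Set.nodup_ofList _
    set M := xs.foldl
        (fun m d =>
          let suffix := pvSuffix d
          let s := m.getD suffix PySem.Set.empty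
          m.insert suffix (PySem.Set.add s d))
        PySem.Dict.empty with hM
    by_cases hmem : pvSuffix d ∈ xs.map pvSuffix
    · -- existing key: insert overwrites in place; dedup unchanged
      have hmemded : pvSuffix d ∈ PySem.List.dedup (xs.map pvSuffix) := by
        rw [PySem.List.dedup_eq_ofList, PySem.Set.mem_ofList]; exact hmem
      have hitem : (pvSuffix d, pvGrp (pvSuffix d) xs) ∈ M.items := by
        rw [ih]; exact List.mem_map_of_mem hmemded
      have hgetD : M.getD (pvSuffix d) PySem.Set.empty = pvGrp (pvSuffix d) xs :=
        PySem.Dict.getD_of_mem_items M hitem hnodup PySem.Set.empty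
      have hcont : M.contains (pvSuffix d) = true := by
        rw [PySem.Dict.contains_iff_mem_keys, hkeys]; exact hmemded
      show (M.insert (pvSuffix d) (PySem.Set.add (M.getD (pvSuffix d) PySem.Set.empty) d)).items = _
      rw [PySem.Dict.items_insert_of_contains M _ hcont, ih, hgetD]
      have hded : PySem.List.dedup ((xs ++ [d]).map pvSuffix)
          = PySem.List.dedup (xs.map pvSuffix) := by
        simp only [List.map_append, List.map_cons, List.map_nil,
          PySem.List.dedup_eq_ofList, PySem.Set.ofList_append_singleton]
        exact PySem.Set.add_of_mem (by rw [PySem.Set.mem_ofList]; exact hmem)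
      rw [hded, List.map_map]
      apply List.map_congr_left
      intro k hk
      simp only [Function.comp]
      rw [pvGrp_append_singleton]
      by_cases hkd : k = pvSuffix d
      · subst hkd; simp
      · simp [hkd, Ne.symm hkd]
    · -- fresh key: insert appends; dedup appends; old buckets untouched
      have hcont : M.contains (pvSuffix d) = false := by
        rw [Bool.eq_false_iff]
        intro hc
        rw [PySem.Dict.contains_iff_mem_keys, hkeys, PySem.List.dedup_eq_ofList,
          PySem.Set.mem_ofList] at hc
        exact hmem hc
      have hgetD : M.getD (pvSuffix d) PySem.Set.empty = PySem.Set.empty :=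
        PySem.Dict.getD_of_not_contains M PySem.Set.empty hcont
      show (M.insert (pvSuffix d) (PySem.Set.add (M.getD (pvSuffix d) PySem.Set.empty) d)).items = _
      rw [PySem.Dict.items_insert_of_not_contains M _ hcont, ih, hgetD]
      have hded : PySem.List.dedup ((xs ++ [d]).map pvSuffix)
          = PySem.List.dedup (xs.map pvSuffix) ++ [pvSuffix d] := by
        simp only [List.map_append, List.map_cons, List.map_nil,
          PySem.List.dedup_eq_ofList, PySem.Set.ofList_append_singleton]
        exact PySem.Set.add_of_not_mem (by rw [PySem.Set.mem_ofList]; exact hmem)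
      rw [hded, List.map_append]
      congr 1
      · apply List.map_congr_left
        intro k hk
        rw [pvGrp_append_singleton, if_neg]
        intro he
        rw [PySem.List.dedup_eq_ofList, PySem.Set.mem_ofList] at hk
        exact hmem (he ▸ hk)
      · simp only [List.map_cons, List.map_nil]
        rw [pvGrp_append_singleton, if_pos rfl,
          pvGrp_empty_of_not_mem _ _ hmem]

-- B's loop, characterised: fresh distinct inserts into an empty dict append
theorem B_eq (xs : List Int) :
    divide_deal_ids_by_suffix_alt xs
    = (PySem.List.dedup (xs.map pvSuffix)).map (fun k => (k, pvGrp k xs)) := by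
  unfold divide_deal_ids_by_suffix_alt
  simp only [List.map_map]
  have hkeyfun : ((fun p : String × Int => p.1) ∘ fun d => (pvSuffix d, d)) = pvSuffix := rfl
  rw [hkeyfun]
  rw [PySem.Dict.items_foldl_insert_fresh
      (k := fun s => s)
      (v := fun suffix => (xs.map (fun d => (pvSuffix d, d))).foldl
        (fun g p => if p.1 = suffix then PySem.Set.add g p.2 else g) PySem.Set.empty)
      (l := PySem.List.dedup (xs.map pvSuffix))
      (d := PySem.Dict.empty)
      (by intro a _; exact PySem.Dict.contains_empty a)
      (by simp only [List.map_id']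
          rw [PySem.List.dedup_eq_ofList]; exact PySem.Set.nodup_ofList _)]
  simp only [PySem.Dict.empty, List.nil_append]
  apply List.map_congr_left
  intro k _
  rw [List.foldl_map]
  rfl

-- ===== VERDICT (by name: the statement is the Claim_ definition above) =====
theorem divide_deal_ids_by_suffix_spec : Claim_equal_divide_deal_ids_by_suffix := by
  intro deal_ids _
  show divide_deal_ids_by_suffix deal_ids = divide_deal_ids_by_suffix_alt deal_ids
  rw [B_eq]
  exact A_items_eq deal_ids
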